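-- pv_equiv track=rewrite | github.com/Brsilheb/gravidez-app | services/pregnancy_service.py | get_baby_size
-- ===== SOURCE A (Python) =====
-- def get_baby_size(week: int) -> str:
--     """
--     Retorna uma comparação simbólica do tamanho do bebê
--     de acordo com a semana da gravidez.
--     """
--
--     sizes = {
--         8: "🍇 Do tamanho de uma uva",
--         12: "🍋 Do tamanho de um limão",
--         16: "🥑 Do tamanho de um abacate",
--         20: "🍌 Do tamanho de uma banana",
--         24: "🌽 Do tamanho de um milho",
--         28: "🥥 Do tamanho de um coco",
--         32: "🍍 Do tamanho de um abacaxi pequeno",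
--         36: "🥬 Do tamanho de uma alface",
--         40: "🎀 Pronto para chegar",
--     }
--
--     # Seleciona o maior marco <= semana atual
--     valid_weeks = sorted(sizes.keys())
--     selected = valid_weeks[0]
--
--     for w in valid_weeks:
--         if week >= w:
--             selected = w
--
--     return sizes[selected]
-- ===== SOURCE B (Python) =====
-- # Closed-form lookup: milestone weeks 8,12,...,40 form an arithmetic sequence,
-- # so the answer is SIZES[clamp((week-8)//4, 0, 8)] -- no dict, no sort, no loop.
-- SIZES = [
--     "🍇 Do tamanho de uma uva",
--     "🍋 Do tamanho de um limão",
--     "🥑 Do tamanho de um abacate",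
--     "🍌 Do tamanho de uma banana",
--     "🌽 Do tamanho de um milho",
--     "🥥 Do tamanho de um coco",
--     "🍍 Do tamanho de um abacaxi pequeno",
--     "🥬 Do tamanho de uma alface",
--     "🎀 Pronto para chegar",
-- ]
--
-- def get_baby_size(week: int) -> str:
--     idx = max(0, min(8, (week - 8) // 4))
--     return SIZES[idx]
-- ===== Notes on version B (the rewrite author's own statement) =====
-- stated objective: simpler
-- what changed: Replaces the dict + sort + linear scan for the largest milestone not exceeding the week with a direct list lookup at a closed-form clamped floor-division index, exploiting that the milestone weeks form an arithmetic sequence with constant step.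
import Mathlib
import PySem

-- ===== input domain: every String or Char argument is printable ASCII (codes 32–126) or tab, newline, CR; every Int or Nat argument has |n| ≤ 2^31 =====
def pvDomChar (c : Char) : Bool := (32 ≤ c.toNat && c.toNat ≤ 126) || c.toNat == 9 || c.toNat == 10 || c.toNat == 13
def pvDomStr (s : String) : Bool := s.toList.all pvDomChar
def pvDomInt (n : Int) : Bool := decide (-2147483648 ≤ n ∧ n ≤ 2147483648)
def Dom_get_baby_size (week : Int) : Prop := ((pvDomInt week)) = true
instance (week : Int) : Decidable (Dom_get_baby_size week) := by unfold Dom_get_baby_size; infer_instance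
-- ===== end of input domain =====

-- B replaces A's dict + sort + forward scan with a closed-form clamped index into a list (simpler).

-- ===== PORT A =====
def get_baby_size (week : Int) : String :=
  let sizes : PySem.Dict Int String := PySem.Dict.ofList
    [(8, "🍇 Do tamanho de uma uva"),
     (12, "🍋 Do tamanho de um limão"),
     (16, "🥑 Do tamanho de um abacate"),
     (20, "🍌 Do tamanho de uma banana"),
     (24, "🌽 Do tamanho de um milho"),
     (28, "🥥 Do tamanho de um coco"),
     (32, "🍍 Do tamanho de um abacaxi pequeno"),
     (36, "🥬 Do tamanho de uma alface"),
     (40, "🎀 Pronto para chegar")]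
  let valid_weeks := PySem.List.sorted sizes.keys (fun x => x) false
  let selected := PySem.List.pyGetD valid_weeks 0 0   -- valid_weeks[0]; in range (9 keys)
  let selected := valid_weeks.foldl (fun sel w => if week ≥ w then w else sel) selected
  sizes.getD selected ""   -- sizes[selected]; selected is always a key, so no KeyError

-- ===== PORT B =====
def pvSizes : List String :=
  ["🍇 Do tamanho de uma uva",
   "🍋 Do tamanho de um limão",
   "🥑 Do tamanho de um abacate",
   "🍌 Do tamanho de uma banana",
   "🌽 Do tamanho de um milho",
   "🥥 Do tamanho de um coco",
   "🍍 Do tamanho de um abacaxi pequeno",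
   "🥬 Do tamanho de uma alface",
   "🎀 Pronto para chegar"]

def get_baby_size_alt (week : Int) : String :=
  let idx := max 0 (min 8 (PySem.Int.floordiv (week - 8) 4))
  PySem.List.pyGetD pvSizes idx ""   -- idx ∈ [0,8] by the clamp, so in range

-- ===== PRECONDITION & SPEC =====
def Spec_get_baby_size (week : Int) (out : String) : Prop := out = get_baby_size_alt week
instance (week : Int) (out : String) : Decidable (Spec_get_baby_size week out) := by unfold Spec_get_baby_size; infer_instance

-- ===== CLAIM (what is proved, stated in full; the proofs are below) =====
def Claim_equal_get_baby_size : Prop := ∀ (week : Int), Dom_get_baby_size week → Spec_get_baby_size week (get_baby_size week)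

-- ===== LEMMAS AND PROOFS =====
theorem pv_eq (week : Int) : get_baby_size week = get_baby_size_alt week := by
  unfold get_baby_size get_baby_size_alt pvSizes
  dsimp only
  have hv : PySem.List.sorted (PySem.Dict.ofList ([(8, "🍇 Do tamanho de uma uva"), (12, "🍋 Do tamanho de um limão"), (16, "🥑 Do tamanho de um abacate"), (20, "🍌 Do tamanho de uma banana"), (24, "🌽 Do tamanho de um milho"), (28, "🥥 Do tamanho de um coco"), (32, "🍍 Do tamanho de um abacaxi pequeno"), (36, "🥬 Do tamanho de uma alface"), (40, "🎀 Pronto para chegar")] : List (Int × String))).keys (fun x => x) false = [8, 12, 16, 20, 24, 28, 32, 36, 40] := by decide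
  rw [hv]
  have hsel : PySem.List.pyGetD ([8, 12, 16, 20, 24, 28, 32, 36, 40] : List Int) 0 0 = 8 := by decide
  rw [hsel]
  rcases show week < 8 ∨ (8 ≤ week ∧ week < 12) ∨ (12 ≤ week ∧ week < 16) ∨ (16 ≤ week ∧ week < 20) ∨
      (20 ≤ week ∧ week < 24) ∨ (24 ≤ week ∧ week < 28) ∨ (28 ≤ week ∧ week < 32) ∨
      (32 ≤ week ∧ week < 36) ∨ (36 ≤ week ∧ week < 40) ∨ 40 ≤ week by omega with
    h | h | h | h | h | h | h | h | h | h
  · have hidx : max 0 (min 8 (PySem.Int.floordiv (week - 8) 4)) = 0 := by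
      have hf : PySem.Int.floordiv (week - 8) 4 < 0 :=
        (PySem.Int.floordiv_lt_iff_lt_mul (by norm_num)).mpr (by omega)
      omega
    rw [hidx]
    simp only [List.foldl, show ¬ week ≥ 8 by omega, show ¬ week ≥ 12 by omega, show ¬ week ≥ 16 by omega, show ¬ week ≥ 20 by omega, show ¬ week ≥ 24 by omega, show ¬ week ≥ 28 by omega, show ¬ week ≥ 32 by omega, show ¬ week ≥ 36 by omega, show ¬ week ≥ 40 by omega]
    decide
  · have hidx : max 0 (min 8 (PySem.Int.floordiv (week - 8) 4)) = 0 := by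
      have hf : PySem.Int.floordiv (week - 8) 4 = 0 :=
        (PySem.Int.floordiv_eq_iff_of_pos (by norm_num)).mpr (by omega)
      omega
    rw [hidx]
    simp only [List.foldl, show week ≥ 8 by omega, show ¬ week ≥ 12 by omega, show ¬ week ≥ 16 by omega, show ¬ week ≥ 20 by omega, show ¬ week ≥ 24 by omega, show ¬ week ≥ 28 by omega, show ¬ week ≥ 32 by omega, show ¬ week ≥ 36 by omega, show ¬ week ≥ 40 by omega]
    decide
  · have hidx : max 0 (min 8 (PySem.Int.floordiv (week - 8) 4)) = 1 := by
      have hf : PySem.Int.floordiv (week - 8) 4 = 1 :=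
        (PySem.Int.floordiv_eq_iff_of_pos (by norm_num)).mpr (by omega)
      omega
    rw [hidx]
    simp only [List.foldl, show week ≥ 8 by omega, show week ≥ 12 by omega, show ¬ week ≥ 16 by omega, show ¬ week ≥ 20 by omega, show ¬ week ≥ 24 by omega, show ¬ week ≥ 28 by omega, show ¬ week ≥ 32 by omega, show ¬ week ≥ 36 by omega, show ¬ week ≥ 40 by omega]
    decide
  · have hidx : max 0 (min 8 (PySem.Int.floordiv (week - 8) 4)) = 2 := by
      have hf : PySem.Int.floordiv (week - 8) 4 = 2 :=
        (PySem.Int.floordiv_eq_iff_of_pos (by norm_num)).mpr (by omega)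
      omega
    rw [hidx]
    simp only [List.foldl, show week ≥ 8 by omega, show week ≥ 12 by omega, show week ≥ 16 by omega, show ¬ week ≥ 20 by omega, show ¬ week ≥ 24 by omega, show ¬ week ≥ 28 by omega, show ¬ week ≥ 32 by omega, show ¬ week ≥ 36 by omega, show ¬ week ≥ 40 by omega]
    decide
  · have hidx : max 0 (min 8 (PySem.Int.floordiv (week - 8) 4)) = 3 := by
      have hf : PySem.Int.floordiv (week - 8) 4 = 3 :=
        (PySem.Int.floordiv_eq_iff_of_pos (by norm_num)).mpr (by omega)
      omega
    rw [hidx]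
    simp only [List.foldl, show week ≥ 8 by omega, show week ≥ 12 by omega, show week ≥ 16 by omega, show week ≥ 20 by omega, show ¬ week ≥ 24 by omega, show ¬ week ≥ 28 by omega, show ¬ week ≥ 32 by omega, show ¬ week ≥ 36 by omega, show ¬ week ≥ 40 by omega]
    decide
  · have hidx : max 0 (min 8 (PySem.Int.floordiv (week - 8) 4)) = 4 := by
      have hf : PySem.Int.floordiv (week - 8) 4 = 4 :=
        (PySem.Int.floordiv_eq_iff_of_pos (by norm_num)).mpr (by omega)
      omega
    rw [hidx]
    simp only [List.foldl, show week ≥ 8 by omega, show week ≥ 12 by omega, show week ≥ 16 by omega, show week ≥ 20 by omega, show week ≥ 24 by omega, show ¬ week ≥ 28 by omega, show ¬ week ≥ 32 by omega, show ¬ week ≥ 36 by omega, show ¬ week ≥ 40 by omega]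
    decide
  · have hidx : max 0 (min 8 (PySem.Int.floordiv (week - 8) 4)) = 5 := by
      have hf : PySem.Int.floordiv (week - 8) 4 = 5 :=
        (PySem.Int.floordiv_eq_iff_of_pos (by norm_num)).mpr (by omega)
      omega
    rw [hidx]
    simp only [List.foldl, show week ≥ 8 by omega, show week ≥ 12 by omega, show week ≥ 16 by omega, show week ≥ 20 by omega, show week ≥ 24 by omega, show week ≥ 28 by omega, show ¬ week ≥ 32 by omega, show ¬ week ≥ 36 by omega, show ¬ week ≥ 40 by omega]
    decide
  · have hidx : max 0 (min 8 (PySem.Int.floordiv (week - 8) 4)) = 6 := by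
      have hf : PySem.Int.floordiv (week - 8) 4 = 6 :=
        (PySem.Int.floordiv_eq_iff_of_pos (by norm_num)).mpr (by omega)
      omega
    rw [hidx]
    simp only [List.foldl, show week ≥ 8 by omega, show week ≥ 12 by omega, show week ≥ 16 by omega, show week ≥ 20 by omega, show week ≥ 24 by omega, show week ≥ 28 by omega, show week ≥ 32 by omega, show ¬ week ≥ 36 by omega, show ¬ week ≥ 40 by omega]
    decide
  · have hidx : max 0 (min 8 (PySem.Int.floordiv (week - 8) 4)) = 7 := by
      have hf : PySem.Int.floordiv (week - 8) 4 = 7 :=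
        (PySem.Int.floordiv_eq_iff_of_pos (by norm_num)).mpr (by omega)
      omega
    rw [hidx]
    simp only [List.foldl, show week ≥ 8 by omega, show week ≥ 12 by omega, show week ≥ 16 by omega, show week ≥ 20 by omega, show week ≥ 24 by omega, show week ≥ 28 by omega, show week ≥ 32 by omega, show week ≥ 36 by omega, show ¬ week ≥ 40 by omega]
    decide
  · have hidx : max 0 (min 8 (PySem.Int.floordiv (week - 8) 4)) = 8 := by
      have hf : (8:Int) ≤ PySem.Int.floordiv (week - 8) 4 :=
        (PySem.Int.le_floordiv_iff_mul_le (by norm_num)).mpr (by omega)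
      omega
    rw [hidx]
    simp only [List.foldl, show week ≥ 8 by omega, show week ≥ 12 by omega, show week ≥ 16 by omega, show week ≥ 20 by omega, show week ≥ 24 by omega, show week ≥ 28 by omega, show week ≥ 32 by omega, show week ≥ 36 by omega, show week ≥ 40 by omega]
    decide

-- ===== VERDICT (by name: the statement is the Claim_ definition above) =====
theorem get_baby_size_spec : Claim_equal_get_baby_size := by
  intro week _; exact pv_eq week
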